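-- pv_equiv track=rewrite | github.com/tungtylee/seismic-viewer | gaussian_test.py | filter_time_by_on_off
-- ===== SOURCE A (Python) =====
-- def filter_time_by_on_off(time_abs_str_list, time_rel_list, on_rel, span=60):
--     # Initialize filtered lists
--     time_abs_str_list_filt = []
--     time_rel_list_filt = []
--
--     # Loop through each relative time and corresponding absolute time
--     for abs_time, rel_time in zip(time_abs_str_list, time_rel_list):
--         # Check if the current relative time falls within any of the on_off_rel ranges
--         matched = any(abs(rel_time - event_time) < span for event_time in on_rel)
--
--         # If matched, add to the filtered lists
--         if matched:
--             time_abs_str_list_filt.append(abs_time)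
--             time_rel_list_filt.append(rel_time)
--
--     # Return the filtered absolute and relative times
--     return time_abs_str_list_filt, time_rel_list_filt
-- ===== SOURCE B (Python) =====
-- def filter_time_by_on_off(time_abs_str_list, time_rel_list, on_rel, span=60):
--     # Sort the events once; a time is kept iff one of the two events adjacent
--     # to its binary-search insertion point is within `span`.  Select the kept
--     # (abs, rel) pairs in one filtering comprehension, then split into the two
--     # result lists.
--     events = sorted(on_rel)
--     n = len(events)
--
--     def near(t):
--         lo, hi = 0, n
--         while lo < hi:
--             mid = (lo + hi) // 2
--             if events[mid] < t:
--                 lo = mid + 1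
--             else:
--                 hi = mid
--         return (lo < n and events[lo] - t < span) or \
--                (lo > 0 and t - events[lo - 1] < span)
--
--     pairs = [(a, r) for a, r in zip(time_abs_str_list, time_rel_list) if near(r)]
--     return [a for a, _ in pairs], [r for _, r in pairs]
-- ===== Notes on version B (the rewrite author's own statement) =====
-- stated objective: faster
-- what changed: Instead of A's accumulator loop that scans every event for every time, B sorts on_rel once, decides each time by binary search against its two neighbouring events, selects the kept pairs with a filtering comprehension and projects them into the two result lists.
import Mathlib
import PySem

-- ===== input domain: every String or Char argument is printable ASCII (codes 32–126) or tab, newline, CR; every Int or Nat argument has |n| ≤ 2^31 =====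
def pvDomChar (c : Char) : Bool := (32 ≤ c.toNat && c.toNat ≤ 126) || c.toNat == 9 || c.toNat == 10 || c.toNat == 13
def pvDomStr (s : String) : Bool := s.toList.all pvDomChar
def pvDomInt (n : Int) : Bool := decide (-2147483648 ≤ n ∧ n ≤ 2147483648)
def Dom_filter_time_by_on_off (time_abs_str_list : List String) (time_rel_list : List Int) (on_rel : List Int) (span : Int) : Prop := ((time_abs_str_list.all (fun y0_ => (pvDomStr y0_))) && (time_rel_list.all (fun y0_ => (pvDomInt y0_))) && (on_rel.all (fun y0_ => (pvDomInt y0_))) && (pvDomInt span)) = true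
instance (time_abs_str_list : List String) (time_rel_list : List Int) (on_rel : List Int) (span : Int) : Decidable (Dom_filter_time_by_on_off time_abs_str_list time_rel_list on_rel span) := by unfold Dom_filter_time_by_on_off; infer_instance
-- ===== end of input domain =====

-- B sorts on_rel once and decides each time by binary search against its two neighbouring
-- events, filtering the zipped pairs and projecting them (asymptotically faster); total, no Pre_.

-- ===== PORT A =====
def filter_time_by_on_off (time_abs_str_list : List String) (time_rel_list : List Int) (on_rel : List Int) (span : Int) : List String × List Int :=
  (time_abs_str_list.zip time_rel_list).foldl
    (fun acc p =>
      -- matched = any(abs(rel_time - event_time) < span for event_time in on_rel)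
      if on_rel.any (fun event_time => decide (|p.2 - event_time| < span)) then
        (acc.1 ++ [p.1], acc.2 ++ [p.2])
      else acc)
    ([], [])

-- ===== PORT B =====
-- Source B's hand-written bisect loop is precisely bisect.bisect_left, ported as
-- PySem.List.bisectLeft; the two comprehensions become filter and two projections.
def filter_time_by_on_off_alt (time_abs_str_list : List String) (time_rel_list : List Int) (on_rel : List Int) (span : Int) : List String × List Int :=
  let events := PySem.List.sorted on_rel (fun x => x) false
  let near := fun (t : Int) =>
    let lo := PySem.List.bisectLeft events t
    (decide (lo < events.length) && decide (events.getD lo 0 - t < span))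
    || (decide (0 < lo) && decide (t - events.getD (lo - 1) 0 < span))
  let pairs := (time_abs_str_list.zip time_rel_list).filter (fun q => near q.2)
  (pairs.map Prod.fst, pairs.map Prod.snd)

-- ===== PRECONDITION & SPEC =====
def Spec_filter_time_by_on_off (time_abs_str_list : List String) (time_rel_list : List Int) (on_rel : List Int) (span : Int) (out : List String × List Int) : Prop := out = filter_time_by_on_off_alt time_abs_str_list time_rel_list on_rel span
instance (time_abs_str_list : List String) (time_rel_list : List Int) (on_rel : List Int) (span : Int) (out : List String × List Int) : Decidable (Spec_filter_time_by_on_off time_abs_str_list time_rel_list on_rel span out) := by unfold Spec_filter_time_by_on_off; infer_instance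

-- ===== CLAIM =====
def Claim_equal_filter_time_by_on_off : Prop := ∀ (time_abs_str_list : List String) (time_rel_list : List Int) (on_rel : List Int) (span : Int), Dom_filter_time_by_on_off time_abs_str_list time_rel_list on_rel span → Spec_filter_time_by_on_off time_abs_str_list time_rel_list on_rel span (filter_time_by_on_off time_abs_str_list time_rel_list on_rel span)

-- ===== LEMMAS AND PROOFS =====

-- per-element: A's scan of all events equals B's neighbour check at the insertion point
theorem pvCond_eq (on_rel : List Int) (t span : Int) :
    (on_rel.any (fun event_time => decide (|t - event_time| < span))) =
    (let events := PySem.List.sorted on_rel (fun x => x) false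
     let lo := PySem.List.bisectLeft events t
     (decide (lo < events.length) && decide (events.getD lo 0 - t < span))
     || (decide (0 < lo) && decide (t - events.getD (lo - 1) 0 < span))) := by
  have hperm : (PySem.List.sorted on_rel (fun x => x) false).Perm on_rel :=
    PySem.List.sorted_perm on_rel (fun x => x) false
  have hpw : (PySem.List.sorted on_rel (fun x => x) false).Pairwise (· ≤ ·) := by
    have := PySem.List.sorted_pairwise on_rel (fun x => x)
    simpa using this
  set s := PySem.List.sorted on_rel (fun x => x) false with hsdef
  obtain ⟨hle, hlow, hhigh⟩ := PySem.List.bisectLeft_spec s t hpw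
  set i := PySem.List.bisectLeft s t with hidef
  show _ = ((decide (i < s.length) && decide (s.getD i 0 - t < span))
     || (decide (0 < i) && decide (t - s.getD (i - 1) 0 < span)))
  rw [Bool.eq_iff_iff]
  simp only [List.any_eq_true, decide_eq_true_iff, Bool.or_eq_true, Bool.and_eq_true]
  constructor
  · rintro ⟨e, he, habs⟩
    have he' : e ∈ s := hperm.mem_iff.mpr he
    obtain ⟨j, hj, rfl⟩ := List.getElem_of_mem he'
    by_cases hji : j < i
    · right
      have hi0 : 0 < i := by omega
      have hi1 : i - 1 < s.length := by omega
      refine ⟨hi0, ?_⟩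
      have h1 : s[j] ≤ s[i-1] := by
        rcases Nat.eq_or_lt_of_le (by omega : j ≤ i - 1) with hj' | hj'
        · subst hj'; exact le_refl _
        · exact List.pairwise_iff_getElem.mp hpw j (i-1) hj hi1 hj'
      have h2 : s[j] < t := hlow j hj hji
      rw [List.getD_eq_getElem s 0 hi1]
      have habs' : |t - s[j]| = t - s[j] := abs_of_pos (by omega)
      omega
    · left
      have hij : i ≤ j := by omega
      have hi : i < s.length := by omega
      refine ⟨hi, ?_⟩
      have h1 : s[i] ≤ s[j] := by
        rcases Nat.eq_or_lt_of_le hij with hj' | hj'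
        · subst hj'; exact le_refl _
        · exact List.pairwise_iff_getElem.mp hpw i j hi hj hj'
      have h2 : t ≤ s[j] := hhigh j hj hij
      rw [List.getD_eq_getElem s 0 hi]
      have habs' : |t - s[j]| = s[j] - t := by rw [abs_sub_comm]; exact abs_of_nonneg (by omega)
      omega
  · rintro (⟨hi, hnear⟩ | ⟨hi0, hnear⟩)
    · rw [List.getD_eq_getElem s 0 hi] at hnear
      refine ⟨s[i], hperm.mem_iff.mp (List.getElem_mem hi), ?_⟩
      have h2 : t ≤ s[i] := hhigh i hi (le_refl _)
      have habs' : |t - s[i]| = s[i] - t := by rw [abs_sub_comm]; exact abs_of_nonneg (by omega)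
      omega
    · have hi1 : i - 1 < s.length := by omega
      rw [List.getD_eq_getElem s 0 hi1] at hnear
      refine ⟨s[i-1], hperm.mem_iff.mp (List.getElem_mem hi1), ?_⟩
      have h2 : s[i-1] < t := hlow (i-1) hi1 (by omega)
      have habs' : |t - s[i-1]| = t - s[i-1] := abs_of_pos (by omega)
      omega

-- A's pair-accumulator fold over the zipped list is the filter of that list, projected
theorem pvFoldl_pair_filter {α β : Type} (p : α × β → Bool) (l : List (α × β))
    (acc : List α × List β) :
    l.foldl (fun acc q => if p q then (acc.1 ++ [q.1], acc.2 ++ [q.2]) else acc) acc =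
      (acc.1 ++ (l.filter p).map Prod.fst, acc.2 ++ (l.filter p).map Prod.snd) := by
  induction l generalizing acc with
  | nil => simp
  | cons q l ih =>
    simp only [List.foldl_cons, List.filter_cons]
    by_cases hq : p q
    · simp [hq, ih]
    · simp [hq, ih]

-- ===== VERDICT =====
theorem filter_time_by_on_off_spec : Claim_equal_filter_time_by_on_off := by
  intro tas trl on_rel span _
  show _ = _
  simp only [filter_time_by_on_off, filter_time_by_on_off_alt]
  rw [pvFoldl_pair_filter]
  simp only [List.nil_append]
  congr 2 <;>
  · congr 1
    funext q
    exact pvCond_eq on_rel q.2 span
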